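-- pv_equiv track=rewrite | github.com/elplatt/socialchoice | majority.py | social_preference
-- ===== SOURCE A (Python) =====
-- def score(profile):
--     votes = {}
--     for pref, count in profile.items():
--         try:
--             top = pref[0]
--         except IndexError:
--             continue
--         try:
--             votes[top] += count
--         except KeyError:
--             votes[top] = count
--     return votes
--
-- def social_preference(profile):
--     profile_score = score(profile)
--     ordered_scores = sorted(profile_score.items(), reverse=True, key=lambda x: x[1])
--     social_preference = []
--     last_score = ordered_scores[0][1]
--     current_set = set()
--     for alternative, alt_score in ordered_scores:
--         # If the score has changed, create a new set of alternatives
--         if alt_score == last_score: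
--             current_set.add(alternative)
--         else:
--             social_preference.append(current_set)
--             current_set = set([alternative])
--         last_score = alt_score
--     social_preference.append(current_set)
--     return social_preference
-- ===== SOURCE B (Python) =====
-- def score(profile):
--     votes = {}
--     for pref, count in profile.items():
--         try:
--             top = pref[0]
--         except IndexError:
--             continue
--         try:
--             votes[top] += count
--         except KeyError:
--             votes[top] = count
--     return votes
--
-- def social_preference(profile):
--     profile_score = score(profile)
--     distinct = sorted(set(profile_score.values()), reverse=True)
--     return [{alt for alt, s in profile_score.items() if s == v}
--             for v in distinct]
-- ===== Notes on version B (the rewrite author's own statement) =====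
-- stated objective: idiomatic
-- what changed: B replaces A's stateful run-detection scan over the sorted (alternative, score) pairs (current_set/last_score bookkeeping) by computing the distinct scores sorted descending and building each tie-set with a comprehension filtering the score table; B returns [] instead of A's IndexError when no alternative is scored.
-- outside the precondition, e.g. on social_preference({}): A raises IndexError, B returns []
import Mathlib
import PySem

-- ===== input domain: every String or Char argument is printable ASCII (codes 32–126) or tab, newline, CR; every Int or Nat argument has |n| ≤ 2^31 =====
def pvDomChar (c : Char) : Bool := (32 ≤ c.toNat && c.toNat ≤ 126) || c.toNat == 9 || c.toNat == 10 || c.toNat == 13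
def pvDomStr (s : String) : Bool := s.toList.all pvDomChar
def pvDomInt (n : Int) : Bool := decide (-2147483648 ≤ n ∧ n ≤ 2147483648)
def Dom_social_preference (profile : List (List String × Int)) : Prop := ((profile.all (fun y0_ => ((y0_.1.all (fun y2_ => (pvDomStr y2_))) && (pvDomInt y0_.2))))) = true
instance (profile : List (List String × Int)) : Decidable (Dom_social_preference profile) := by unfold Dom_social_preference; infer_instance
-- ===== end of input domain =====

-- B groups alternatives by looking up each distinct plurality score (sorted descending) and
-- filtering the scored alternatives, instead of A's run-detection scan over the sorted items
-- (alternative decomposition; B returns [] where A raises IndexError — excluded by Pre_).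


-- ===== PORT A =====
-- shared helper `score` (Source B keeps A's helper verbatim): tally counts by top alternative
def pyScoreStep (votes : PySem.Dict String Int) (pc : List String × Int) : PySem.Dict String Int :=
  match pc.1 with
  | [] => votes                                             -- except IndexError: continue
  | top :: _ => votes.insert top (votes.getD top 0 + pc.2)  -- votes[top] += count / = count

def pyScore (profile : List (List String × Int)) : PySem.Dict String Int :=
  (PySem.Dict.ofList profile).items.foldl pyScoreStep PySem.Dict.empty

-- one iteration of A's loop: state = (social_preference, current_set, last_score)
def spStep (st : List (List String) × PySem.Set String × Int) (p : String × Int) :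
    List (List String) × PySem.Set String × Int :=
  if p.2 == st.2.2 then (st.1, PySem.Set.add st.2.1 p.1, p.2)
  else (st.1 ++ [st.2.1], PySem.Set.ofList [p.1], p.2)

def social_preference (profile : List (List String × Int)) : List (List String) :=
  let profile_score := pyScore profile
  let ordered := PySem.List.sorted profile_score.items (fun x => x.2) true
  match ordered with
  | [] => []                            -- Python raises IndexError at ordered_scores[0][1]; outside Pre_
  | first :: _ =>
    let st := ordered.foldl spStep ([], PySem.Set.empty, first.2)
    st.1 ++ [st.2.1]

-- ===== PORT B =====
def social_preference_alt (profile : List (List String × Int)) : List (List String) :=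
  let profile_score := pyScore profile
  let distinct := PySem.List.sorted (PySem.Set.ofList profile_score.values) (fun v => v) true
  distinct.map (fun v =>
    PySem.Set.ofList ((profile_score.items.filter (fun p => p.2 == v)).map (fun p => p.1)))

-- ===== PRECONDITION & SPEC =====
-- Pre_ excludes exactly the profiles whose preference lists are all empty, on which A raises
-- IndexError (profile_score is empty and A reads ordered_scores[0]).
def Pre_social_preference (profile : List (List String × Int)) : Prop :=
  ∃ p ∈ profile, p.1 ≠ []
instance (profile : List (List String × Int)) : Decidable (Pre_social_preference profile) := by
  unfold Pre_social_preference; infer_instance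
def pvWitness_social_preference : (List (List String × Int)) := [(["a"], 1)]

def Spec_social_preference (profile : List (List String × Int)) (out : List (List String)) : Prop :=
  out = social_preference_alt profile
instance (profile : List (List String × Int)) (out : List (List String)) : Decidable (Spec_social_preference profile out) := by unfold Spec_social_preference; infer_instance

-- ===== CLAIM (what is proved, stated in full; the proofs are below) =====
def Claim_equal_social_preference : Prop := ∀ (profile : List (List String × Int)), Dom_social_preference profile → Pre_social_preference profile → Spec_social_preference profile (social_preference profile)

-- ===== LEMMAS AND PROOFS =====

-- descending-by-score order used throughout
def pvDesc (a b : String × Int) : Prop := b.2 ≤ a.2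

-- A's loop, written as structural recursion on the remaining items
def pvGroups (last : Int) (cur : PySem.Set String) : List (String × Int) → List (List String)
  | [] => [cur]
  | p :: rest =>
    if p.2 == last then pvGroups last (PySem.Set.add cur p.1) rest
    else cur :: pvGroups p.2 (PySem.Set.ofList [p.1]) rest

-- the run decomposition of a (descending) list: names of each maximal equal-score run
def pvGspec : List (String × Int) → List (List String)
  | [] => []
  | p :: rest =>
    (p.1 :: (rest.takeWhile (fun q => q.2 == p.2)).map (fun q => q.1)) ::
      pvGspec (rest.dropWhile (fun q => q.2 == p.2))
  termination_by l => l.length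
  decreasing_by
    simp only [List.length_cons]
    exact Nat.lt_succ_of_le (List.Sublist.length_le (List.dropWhile_sublist _))

-- the distinct scores, one per run, in list order
def pvSvals : List (String × Int) → List Int
  | [] => []
  | p :: rest => p.2 :: pvSvals (rest.dropWhile (fun q => q.2 == p.2))
  termination_by l => l.length
  decreasing_by
    simp only [List.length_cons]
    exact Nat.lt_succ_of_le (List.Sublist.length_le (List.dropWhile_sublist _))

theorem aux_foldl_add (l s : List String) (h : (s ++ l).Nodup) :
    l.foldl PySem.Set.add s = s ++ l := by
  induction l generalizing s with
  | nil => simp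
  | cons a t ih =>
    have ha : a ∉ s := by
      intro hmem
      exact (List.disjoint_of_nodup_append h) hmem (by simp)
    have hadd : PySem.Set.add s a = s ++ [a] := by
      simp [PySem.Set.add, PySem.Set.contains, List.contains_eq_mem, ha]
    have h' : ((s ++ [a]) ++ t).Nodup := by simpa using h
    simp only [List.foldl_cons, hadd]
    rw [ih _ h']
    simp

theorem pv_set_ofList_of_nodup (l : List String) (h : l.Nodup) : PySem.Set.ofList l = l := by
  have := aux_foldl_add l [] (by simpa using h)
  simpa [PySem.Set.ofList, PySem.Set.empty] using this

theorem pv_set_single (x : String) : PySem.Set.ofList [x] = [x] := by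
  simp [PySem.Set.ofList, PySem.Set.empty, PySem.Set.add, PySem.Set.contains]

theorem pv_set_add_append (cur : PySem.Set String) (x : String) (h : x ∉ cur) :
    PySem.Set.add cur x = cur ++ [x] := by
  simp [PySem.Set.add, PySem.Set.contains, List.contains_eq_mem, h]

theorem pv_fold_eq_groups (S : List (String × Int)) (sp : List (List String))
    (cur : PySem.Set String) (last : Int) :
    (S.foldl spStep (sp, cur, last)).1 ++ [(S.foldl spStep (sp, cur, last)).2.1]
      = sp ++ pvGroups last cur S := by
  induction S generalizing sp cur last with
  | nil => simp [pvGroups]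
  | cons p rest ih =>
    simp only [List.foldl_cons, pvGroups, spStep]
    by_cases h : p.2 = last
    · subst h
      simp only [BEq.rfl, if_true, ih]
    · have hb : (p.2 == last) = false := by simpa using h
      simp only [hb, Bool.false_eq_true, if_false, ih, List.append_assoc, List.cons_append,
        List.nil_append]

theorem pv_groups_eq_gspec (S : List (String × Int)) (last : Int) (cur : PySem.Set String)
    (hn : (S.map (fun p => p.1)).Nodup) (hc : ∀ p ∈ S, p.1 ∉ cur) :
    pvGroups last cur S
      = (cur ++ (S.takeWhile (fun q => q.2 == last)).map (fun q => q.1)) ::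
          pvGspec (S.dropWhile (fun q => q.2 == last)) := by
  induction S generalizing last cur with
  | nil => simp [pvGroups, pvGspec]
  | cons p rest ih =>
    have hadd : PySem.Set.add cur p.1 = cur ++ [p.1] := pv_set_add_append _ _ (hc p (by simp))
    rw [List.map_cons] at hn
    obtain ⟨hn1, hn'⟩ := List.nodup_cons.mp hn
    have hne : ∀ q ∈ rest, q.1 ≠ p.1 := by
      intro q hq e
      exact hn1 (e ▸ List.mem_map_of_mem (f := fun p => p.1) hq)
    by_cases h : p.2 = last
    · subst h
      have hc' : ∀ q ∈ rest, q.1 ∉ cur ++ [p.1] := by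
        intro q hq
        simp only [List.mem_append, List.mem_singleton]
        rintro (hmem | he)
        · exact hc q (List.mem_cons_of_mem _ hq) hmem
        · exact hne q hq he
      rw [pvGroups, if_pos BEq.rfl, hadd, ih p.2 (cur ++ [p.1]) hn' hc',
        List.takeWhile_cons_of_pos (by simp), List.dropWhile_cons_of_pos (by simp)]
      simp
    · have hb : (p.2 == last) = false := by simpa using h
      have hc'' : ∀ q ∈ rest, q.1 ∉ ([p.1] : List String) := by
        intro q hq
        simpa using hne q hq
      rw [pvGroups, if_neg (by simp [hb]), List.takeWhile_cons_of_neg (by simp [hb]),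
        List.dropWhile_cons_of_neg (by simp [hb]),
        ih p.2 (PySem.Set.ofList [p.1]) hn' (by simpa [pv_set_single] using hc''), pvGspec]
      simp [pv_set_single]

theorem pv_mem_svals (l : List (String × Int)) (v : Int) (hv : v ∈ pvSvals l) :
    ∃ q ∈ l, q.2 = v := by
  induction l using pvSvals.induct with
  | case1 => simp [pvSvals] at hv
  | case2 p rest ih =>
    rw [pvSvals, List.mem_cons] at hv
    rcases hv with h | h
    · exact ⟨p, by simp, h.symm⟩
    · obtain ⟨q, hq, he⟩ := ih h
      exact ⟨q, List.mem_cons_of_mem _ ((List.dropWhile_sublist _).subset hq), he⟩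
theorem pv_dropWhile_lt (l : List (String × Int)) (v : Int) (hp : l.Pairwise pvDesc)
    (hle : ∀ r ∈ l, r.2 ≤ v) :
    ∀ q ∈ l.dropWhile (fun q => q.2 == v), q.2 < v := by
  induction l with
  | nil => simp
  | cons a t ih =>
    by_cases h : a.2 = v
    · rw [List.dropWhile_cons_of_pos (by simp [h])]
      exact ih hp.of_cons (fun r hr => hle r (List.mem_cons_of_mem _ hr))
    · rw [List.dropWhile_cons_of_neg (by simp [h])]
      intro q hq
      rcases List.mem_cons.mp hq with rfl | hq'
      · exact lt_of_le_of_ne (hle q (by simp)) h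
      · have h1 : q.2 ≤ a.2 := (List.pairwise_cons.mp hp).1 q hq'
        exact lt_of_le_of_lt h1 (lt_of_le_of_ne (hle a (by simp)) h)
theorem pv_svals_pairwise (l : List (String × Int)) (hp : l.Pairwise pvDesc) :
    (pvSvals l).Pairwise (fun a b => b < a) := by
  induction l using pvSvals.induct with
  | case1 => simp [pvSvals]
  | case2 p rest ih =>
    have hsub : (rest.dropWhile (fun q => q.2 == p.2)).Sublist rest := List.dropWhile_sublist _
    have hp' : (rest.dropWhile (fun q => q.2 == p.2)).Pairwise pvDesc :=
      (hp.of_cons).sublist hsub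
    have hlt : ∀ q ∈ rest.dropWhile (fun q => q.2 == p.2), q.2 < p.2 :=
      pv_dropWhile_lt rest p.2 hp.of_cons (fun r hr => (List.pairwise_cons.mp hp).1 r hr)
    rw [pvSvals]
    refine List.pairwise_cons.mpr ⟨?_, ih hp'⟩
    intro v hv
    obtain ⟨q, hq, rfl⟩ := pv_mem_svals _ _ hv
    exact hlt q hq

theorem pv_mem_svals_iff (l : List (String × Int)) (hp : l.Pairwise pvDesc) (v : Int) :
    v ∈ pvSvals l ↔ v ∈ l.map (fun p => p.2) := by
  induction l using pvSvals.induct with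
  | case1 => simp [pvSvals]
  | case2 p rest ih =>
    have hp' : (rest.dropWhile (fun q => q.2 == p.2)).Pairwise pvDesc :=
      (hp.of_cons).sublist (List.dropWhile_sublist _)
    rw [pvSvals]
    simp only [List.mem_cons, List.map_cons, ih hp']
    constructor
    · rintro (rfl | h)
      · simp
      · rcases h with h
        right
        exact List.mem_map.mpr (by
          obtain ⟨q, hq, rfl⟩ := List.mem_map.mp h
          exact ⟨q, (List.dropWhile_sublist _).subset hq, rfl⟩)
    · rintro (rfl | h)
      · exact Or.inl rfl
      · obtain ⟨q, hq, rfl⟩ := List.mem_map.mp h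
        by_cases he : q.2 = p.2
        · exact Or.inl he
        · right
          refine List.mem_map.mpr ⟨q, ?_, rfl⟩
          have : rest = rest.takeWhile (fun q => q.2 == p.2) ++ rest.dropWhile (fun q => q.2 == p.2) :=
            (List.takeWhile_append_dropWhile).symm
          rcases List.mem_append.mp (this ▸ hq) with htk | hdr
          · exact absurd (by simpa using List.mem_takeWhile_imp htk) he
          · exact hdr

theorem pv_filter_eq_takeWhile (l : List (String × Int)) (v : Int) (hp : l.Pairwise pvDesc)
    (hle : ∀ r ∈ l, r.2 ≤ v) :
    l.filter (fun q => q.2 == v) = l.takeWhile (fun q => q.2 == v) := by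
  induction l with
  | nil => simp
  | cons a t ih =>
    by_cases h : a.2 = v
    · rw [List.filter_cons_of_pos (by simp [h]), List.takeWhile_cons_of_pos (by simp [h]),
        ih hp.of_cons (fun r hr => hle r (List.mem_cons_of_mem _ hr))]
    · have hlt : a.2 < v := lt_of_le_of_ne (hle a (by simp)) h
      rw [List.filter_cons_of_neg (by simp [h]), List.takeWhile_cons_of_neg (by simp [h])]
      rw [List.filter_eq_nil_iff.mpr]
      intro q hq
      have : q.2 ≤ a.2 := (List.pairwise_cons.mp hp).1 q hq
      simp only [beq_iff_eq]
      omega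

theorem pv_gspec_eq_map_filter (l : List (String × Int)) (hp : l.Pairwise pvDesc) :
    pvGspec l = (pvSvals l).map (fun v => (l.filter (fun q => q.2 == v)).map (fun q => q.1)) := by
  induction l using pvGspec.induct with
  | case1 => simp [pvGspec, pvSvals]
  | case2 p rest ih =>
    have hle : ∀ r ∈ rest, r.2 ≤ p.2 := (List.pairwise_cons.mp hp).1
    have hp' : (rest.dropWhile (fun q => q.2 == p.2)).Pairwise pvDesc :=
      (hp.of_cons).sublist (List.dropWhile_sublist _)
    have hlt : ∀ q ∈ rest.dropWhile (fun q => q.2 == p.2), q.2 < p.2 :=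
      pv_dropWhile_lt rest p.2 hp.of_cons hle
    rw [pvGspec, pvSvals, List.map_cons, ih hp']
    congr 1
    · -- head block
      rw [List.filter_cons_of_pos (by simp), List.map_cons,
        pv_filter_eq_takeWhile rest p.2 hp.of_cons hle]
    · -- tail blocks: for v in svals(drop), filter over (p::rest) = filter over drop
      apply List.map_congr_left
      intro v hv
      obtain ⟨q, hq, rfl⟩ := pv_mem_svals _ _ hv
      have hvlt : q.2 < p.2 := hlt q hq
      have h1 : (p :: rest).filter (fun r => r.2 == q.2)
          = rest.filter (fun r => r.2 == q.2) := by
        rw [List.filter_cons_of_neg (by simp; omega)]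
      rw [h1]
      have hsplit : rest = rest.takeWhile (fun r => r.2 == p.2) ++ rest.dropWhile (fun r => r.2 == p.2) :=
        (List.takeWhile_append_dropWhile).symm
      have h2 : rest.filter (fun r => r.2 == q.2)
          = (rest.dropWhile (fun r => r.2 == p.2)).filter (fun r => r.2 == q.2) := by
        conv_lhs => rw [hsplit]
        rw [List.filter_append, List.filter_eq_nil_iff.mpr, List.nil_append]
        intro r hr
        have : r.2 = p.2 := by simpa using List.mem_takeWhile_imp hr
        simp only [beq_iff_eq]
        omega
      rw [h2]

theorem pv_insertBy_pairwise (x : String × Int) (l : List (String × Int)) (hp : l.Pairwise pvDesc) :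
    (PySem.List.insertBy (fun a b => decide (b.2 < a.2)) x l).Pairwise pvDesc := by
  induction l with
  | nil => simp [PySem.List.insertBy, pvDesc]
  | cons y ys ih =>
    rw [PySem.List.insertBy]
    by_cases h : y.2 < x.2
    · rw [if_pos (by simpa using h)]
      refine List.pairwise_cons.mpr ⟨?_, hp⟩
      intro z hz
      rcases List.mem_cons.mp hz with rfl | hz'
      · exact le_of_lt h
      · exact le_trans ((List.pairwise_cons.mp hp).1 z hz') (le_of_lt h)
    · rw [if_neg (by simpa using h)]
      refine List.pairwise_cons.mpr ⟨?_, ih hp.of_cons⟩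
      intro z hz
      rcases (PySem.List.mem_insertBy _ _ _ _).mp hz with rfl | hz'
      · exact not_lt.mp h
      · exact (List.pairwise_cons.mp hp).1 z hz'

theorem pv_filter_insertBy (x : String × Int) (l : List (String × Int)) (v : Int)
    (hp : l.Pairwise pvDesc) :
    (PySem.List.insertBy (fun a b => decide (b.2 < a.2)) x l).filter (fun q => q.2 == v)
      = if x.2 == v then l.filter (fun q => q.2 == v) ++ [x]
        else l.filter (fun q => q.2 == v) := by
  induction l with
  | nil =>
    simp only [PySem.List.insertBy, List.filter_nil]
    by_cases h : x.2 = v <;> simp [h]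
  | cons y ys ih =>
    rw [PySem.List.insertBy]
    by_cases h : y.2 < x.2
    · rw [if_pos (by simpa using h)]
      by_cases hx : x.2 = v
      · -- all of y::ys have score < x.2 = v, so their filter is empty
        have hnil : (y :: ys).filter (fun q => q.2 == v) = [] := by
          rw [List.filter_eq_nil_iff]
          intro q hq
          have : q.2 ≤ y.2 := by
            rcases List.mem_cons.mp hq with rfl | hq'
            · exact le_refl _
            · exact (List.pairwise_cons.mp hp).1 q hq'
          simp only [beq_iff_eq]
          omega
        rw [List.filter_cons_of_pos (by simp [hx]), hnil, if_pos (by simp [hx])]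
        simp
      · rw [List.filter_cons_of_neg (by simp [hx]), if_neg (by simp [hx])]
    · rw [if_neg (by simpa using h)]
      by_cases hy : y.2 = v
      · rw [List.filter_cons_of_pos (by simp [hy]), List.filter_cons_of_pos (by simp [hy]),
          ih hp.of_cons]
        by_cases hx : x.2 = v <;> simp [hx]
      · rw [List.filter_cons_of_neg (by simp [hy]), List.filter_cons_of_neg (by simp [hy]),
          ih hp.of_cons]

theorem pv_filter_foldl_insertBy (L : List (String × Int)) (acc : List (String × Int)) (v : Int)
    (hp : acc.Pairwise pvDesc) :
    ((L.foldl (fun acc x => PySem.List.insertBy (fun a b => decide (b.2 < a.2)) x acc) acc).filter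
        (fun q => q.2 == v))
      = acc.filter (fun q => q.2 == v) ++ L.filter (fun q => q.2 == v) := by
  induction L generalizing acc with
  | nil => simp
  | cons x t ih =>
    rw [List.foldl_cons, ih _ (pv_insertBy_pairwise x acc hp), pv_filter_insertBy x acc v hp]
    by_cases hx : x.2 = v
    · rw [if_pos (by simp [hx]), List.filter_cons_of_pos (by simp [hx])]
      simp
    · rw [if_neg (by simp [hx]), List.filter_cons_of_neg (by simp [hx])]

theorem pv_sorted_filter (L : List (String × Int)) (v : Int) :
    (PySem.List.sorted L (fun x => x.2) true).filter (fun q => q.2 == v)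
      = L.filter (fun q => q.2 == v) := by
  rw [PySem.List.sorted_rev_eq_foldl_insertBy L (fun x => x.2)]
  simpa using pv_filter_foldl_insertBy L [] v (by simp)

theorem pv_score_keys_nodup (l : List (List String × Int)) (d : PySem.Dict String Int)
    (h : d.keys.Nodup) : (l.foldl pyScoreStep d).keys.Nodup := by
  induction l generalizing d with
  | nil => exact h
  | cons pc t ih =>
    rw [List.foldl_cons]
    apply ih
    rcases pc with ⟨pref, c⟩
    cases pref with
    | nil => exact h
    | cons top tl => exact PySem.Dict.nodup_keys_insert _ _ _ h

theorem pv_step_items_ne (d : PySem.Dict String Int) (pc : List String × Int)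
    (h : d.items ≠ []) : (pyScoreStep d pc).items ≠ [] := by
  rcases pc with ⟨pref, c⟩
  cases pref with
  | nil => exact h
  | cons top tl =>
    simp only [pyScoreStep, PySem.Dict.items_insert]
    split_ifs with hc
    · simpa using h
    · simp

theorem pv_insert_items_ne (d : PySem.Dict String Int) (k : String) (v : Int) :
    (d.insert k v).items ≠ [] := by
  rw [PySem.Dict.items_insert]
  split_ifs with hc
  · intro he
    rw [List.map_eq_nil_iff] at he
    simp [PySem.Dict.contains, he] at hc
  · simp

theorem pv_score_items_ne_nil (l : List (List String × Int)) (d : PySem.Dict String Int)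
    (h : (∃ p ∈ l, p.1 ≠ []) ∨ d.items ≠ []) : (l.foldl pyScoreStep d).items ≠ [] := by
  induction l generalizing d with
  | nil =>
    rcases h with ⟨p, hp, _⟩ | h
    · simp at hp
    · exact h
  | cons pc t ih =>
    rw [List.foldl_cons]
    apply ih
    rcases h with ⟨p, hp, hne⟩ | h
    · rcases List.mem_cons.mp hp with he | hp'
      · right
        subst he
        rcases p with ⟨pref, c⟩
        cases pref with
        | nil => exact absurd rfl hne
        | cons top tl => exact pv_insert_items_ne _ _ _
      · exact Or.inl ⟨p, hp', hne⟩
    · exact Or.inr (pv_step_items_ne _ _ h)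

theorem pv_pre_items_ne_nil (profile : List (List String × Int))
    (h : Pre_social_preference profile) : (pyScore profile).items ≠ [] := by
  obtain ⟨p, hp, hne⟩ := h
  apply pv_score_items_ne_nil
  left
  -- p.1 is a key of Dict.ofList profile, hence appears in its items
  have hk : p.1 ∈ (PySem.Dict.ofList profile).keys := by
    have : (PySem.Dict.ofList profile).keys
        = PySem.Set.update PySem.Dict.empty.keys (profile.map (fun x => x.1)) :=
      PySem.Dict.keys_foldl_insert_key profile (fun x => x.1) (fun _ x => x.2) PySem.Dict.empty
    rw [this, PySem.Set.mem_update]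
    exact Or.inr (List.mem_map_of_mem hp)
  obtain ⟨q, hq, hq1⟩ := List.mem_map.mp hk
  exact ⟨q, hq, by rw [hq1]; exact hne⟩

-- ===== VERDICT (by name: the statement is the Claim_ definition above) =====
theorem social_preference_spec : Claim_equal_social_preference := by
  intro profile _ hpre
  unfold Spec_social_preference
  have hitems_ne : (pyScore profile).items ≠ [] := pv_pre_items_ne_nil profile hpre
  have hkeys : ((pyScore profile).items.map (fun p => p.1)).Nodup := by
    have := pv_score_keys_nodup (PySem.Dict.ofList profile).items PySem.Dict.empty
      (by simp [PySem.Dict.empty, PySem.Dict.keys])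
    simpa [PySem.Dict.keys, pyScore] using this
  set items := (pyScore profile).items with hitems
  set S := PySem.List.sorted items (fun x => x.2) true with hSdef
  have hperm : S.Perm items := PySem.List.sorted_perm items (fun x => x.2) true
  have hSnodup : (S.map (fun p => p.1)).Nodup := ((hperm.map _).nodup_iff).mpr hkeys
  have hSp : S.Pairwise pvDesc :=
    (PySem.List.sorted_pairwise_rev items (fun x => x.2)).imp (fun h => h)
  have hSne : S ≠ [] := by
    rw [hSdef, Ne, PySem.List.sorted_eq_nil_iff]; exact hitems_ne
  obtain ⟨first, rest, hS⟩ := List.exists_cons_of_ne_nil hSne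
  -- A's value is the run decomposition of the sorted items
  have hA : social_preference profile = pvGspec S := by
    rw [social_preference]
    simp only [← hitems, ← hSdef]
    rw [hS]
    dsimp only
    have hfold := pv_fold_eq_groups (first :: rest) [] PySem.Set.empty first.2
    simp only [List.nil_append] at hfold
    rw [hfold]
    have hgr := pv_groups_eq_gspec (first :: rest) first.2 PySem.Set.empty
      (hS ▸ hSnodup) (by intro p _; simp [PySem.Set.empty])
    rw [hgr, List.takeWhile_cons_of_pos (by simp), List.dropWhile_cons_of_pos (by simp),
      pvGspec]
    simp [PySem.Set.empty]
  -- B's distinct sorted scores are exactly the run scores of S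
  have hvals : (pyScore profile).values = items.map (fun p => p.2) := rfl
  have hnd1 : (pvSvals S).Nodup :=
    (pv_svals_pairwise S hSp).imp (fun h => (ne_of_lt h).symm)
  have hdist : PySem.List.sorted (PySem.Set.ofList ((pyScore profile).values))
      (fun v => v) true = pvSvals S := by
    apply PySem.List.sorted_rev_eq_of_perm_of_pairwise_gt
    · apply (List.perm_ext_iff_of_nodup hnd1 (PySem.Set.nodup_ofList _)).mpr
      intro v
      rw [PySem.Set.mem_ofList, hvals, pv_mem_svals_iff S hSp v]
      exact (hperm.map (fun p => p.2)).mem_iff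
    · exact pv_svals_pairwise S hSp
  rw [hA, pv_gspec_eq_map_filter S hSp, social_preference_alt]
  simp only [← hitems, hdist]
  apply List.map_congr_left
  intro v _
  rw [hSdef, pv_sorted_filter items v, pv_set_ofList_of_nodup]
  exact List.Nodup.sublist (List.filter_sublist.map _) hkeys
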